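-- pv_equiv track=rewrite | github.com/MinhxLe/aoc-2024 | y2023/d22.py | get_bricks_to_fall_count
-- ===== SOURCE A (Python) =====
-- def get_bricks_to_fall_count(brick_id, bricks_below_map):
--     count = 0
--     bricks_to_fall = [brick_id]
--     while len(bricks_to_fall) > 0:
--         brick_to_fall = bricks_to_fall.pop()
--         for above, belows in bricks_below_map.items():
--             if brick_to_fall in belows:
--                 belows.remove(brick_to_fall)
--                 if len(belows) == 0:
--                     count += 1
--                     bricks_to_fall.append(above)
--     return count
-- ===== SOURCE B (Python) =====
-- def get_bricks_to_fall_count(brick_id, bricks_below_map):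
--     # Alternative algorithm: precompute reverse adjacency and per-brick support
--     # counters once, then run the cascade touching only the affected entries (A
--     # rescans the whole map per fallen brick).  Return value only: unlike A, B
--     # does not mutate bricks_below_map.
--     rev = {}
--     state = {}
--     for above, belows in bricks_below_map.items():
--         counts = {}
--         for x in belows:
--             if x in counts:
--                 counts[x] += 1
--             else:
--                 counts[x] = 1
--                 rev.setdefault(x, []).append(above)
--         state[above] = (counts, len(belows))
--     count = 0
--     stack = [brick_id]
--     while stack:
--         b = stack.pop()
--         for above in rev.get(b, []):
--             counts, total = state[above]
--             c = counts.get(b, 0)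
--             if c > 0:
--                 counts[b] = c - 1
--                 total -= 1
--                 state[above] = (counts, total)
--                 if total == 0:
--                     count += 1
--                     stack.append(above)
--     return count
-- ===== Notes on version B (the rewrite author's own statement) =====
-- stated objective: alternative
-- what changed: B precomputes, in one pass, a reverse adjacency map (brick -> keys supported by it) and per-key support counters, then runs the cascade touching only the entries that mention the fallen brick, instead of A's rescan of the whole map (with linear list membership/remove) for every fallen brick; it trades A's repeated scans for a one-off index build.
import Mathlib
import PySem

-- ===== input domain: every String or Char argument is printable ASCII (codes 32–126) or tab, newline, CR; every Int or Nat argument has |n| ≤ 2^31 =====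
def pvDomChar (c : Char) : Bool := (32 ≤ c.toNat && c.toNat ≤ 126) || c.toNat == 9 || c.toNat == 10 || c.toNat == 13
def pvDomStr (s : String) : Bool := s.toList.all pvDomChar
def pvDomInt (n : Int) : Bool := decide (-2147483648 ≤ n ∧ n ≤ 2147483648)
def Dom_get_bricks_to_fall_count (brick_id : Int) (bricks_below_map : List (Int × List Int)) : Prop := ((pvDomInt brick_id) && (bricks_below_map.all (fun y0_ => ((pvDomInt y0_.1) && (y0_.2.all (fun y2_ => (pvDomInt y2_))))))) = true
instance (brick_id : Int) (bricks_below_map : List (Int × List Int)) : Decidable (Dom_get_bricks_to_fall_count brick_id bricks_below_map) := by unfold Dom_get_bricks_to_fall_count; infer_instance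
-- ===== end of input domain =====

-- B replaces A's full rescan of the map per fallen brick by a precomputed reverse
-- adjacency with per-brick support counters (objective: alternative algorithm).
-- Return value only: A empties the lists inside bricks_below_map in place, B does
-- not mutate its argument.

-- ===== PORT A =====
-- One pass of A's inner `for above, belows in bricks_below_map.items()` loop for the
-- popped brick b: returns the mutated map together with the keys whose belows list
-- became empty, in iteration order (Python appends them to the stack and adds 1 to
-- count for each as it scans; the caller below does both per collected key).
def aScan (b : Int) : List (Int × List Int) → List (Int × List Int) × List Int
  | [] => ([], [])
  | (k, belows) :: rest =>
    let (m', pushed) := aScan b rest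
    if b ∈ belows then
      -- belows.remove(brick_to_fall): first occurrence, present by the guard
      let belows' := (PySem.List.remove? belows b).getD belows
      if belows' = [] then ((k, belows') :: m', k :: pushed)
      else ((k, belows') :: m', pushed)
    else ((k, belows) :: m', pushed)

-- A's while-loop; the stack's top (Python `list.pop()` = last element) is the head
-- here, so Python's in-order appends become `pushed.reverse ++ rest`. fuel bounds the
-- number of loop iterations: each key is appended at most once, so
-- bricks_below_map.length + 1 iterations always suffice.
def aLoop : Nat → Int → List Int → List (Int × List Int) → Int
  | 0, count, _, _ => count
  | fuel + 1, count, stack, m =>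
    match stack with
    | [] => count
    | b :: rest =>
      let (m', pushed) := aScan b m
      aLoop fuel (count + (pushed.length : Int)) (pushed.reverse ++ rest) m'

def get_bricks_to_fall_count (brick_id : Int) (bricks_below_map : List (Int × List Int)) : Int :=
  aLoop (bricks_below_map.length + 1) 0 [brick_id] bricks_below_map

-- ===== PORT B =====
-- Build phase, inner loop body over one belows list (key `above`):
-- counts[x] += 1 on repeats, else counts[x] = 1 and rev.setdefault(x, []).append(above).
def bAddBelow (above : Int) (st : PySem.Dict Int Int × PySem.Dict Int (List Int)) (x : Int) :
    PySem.Dict Int Int × PySem.Dict Int (List Int) :=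
  let (counts, rev) := st
  if counts.contains x then (counts.insert x (counts.getD x 0 + 1), rev)
  else (counts.insert x 1, rev.insert x (rev.getD x [] ++ [above]))

-- Build phase, one key: state[above] = (counts, len(belows)).
def bBuildStep (st : PySem.Dict Int (PySem.Dict Int Int × Int) × PySem.Dict Int (List Int))
    (kv : Int × List Int) :
    PySem.Dict Int (PySem.Dict Int Int × Int) × PySem.Dict Int (List Int) :=
  let (state, rev) := st
  let (counts, rev') := kv.2.foldl (bAddBelow kv.1) (PySem.Dict.empty, rev)
  (state.insert kv.1 (counts, PySem.List.len kv.2), rev')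

def bBuild (m : List (Int × List Int)) :
    PySem.Dict Int (PySem.Dict Int Int × Int) × PySem.Dict Int (List Int) :=
  m.foldl bBuildStep (PySem.Dict.empty, PySem.Dict.empty)

-- Cascade phase, body of `for above in rev.get(b, [])`. state[above] is ported with a
-- default that the guard then rejects; it is never used, since rev only holds keys of
-- state. Stack top at the head (as in port A).
def bTouch (b : Int) (st : PySem.Dict Int (PySem.Dict Int Int × Int) × Int × List Int)
    (above : Int) : PySem.Dict Int (PySem.Dict Int Int × Int) × Int × List Int :=
  let (state, count, stack) := st
  let (counts, total) := state.getD above (PySem.Dict.empty, 0)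
  let c := counts.getD b 0
  if 0 < c then
    let counts' := counts.insert b (c - 1)
    let total' := total - 1
    let state' := state.insert above (counts', total')
    if total' = 0 then (state', count + 1, above :: stack) else (state', count, stack)
  else st

-- B's while-loop, same fuel bound as A's (number of pops ≤ number of keys + 1).
def bLoop : Nat → PySem.Dict Int (List Int) → Int → List Int →
    PySem.Dict Int (PySem.Dict Int Int × Int) → Int
  | 0, _, count, _, _ => count
  | fuel + 1, rev, count, stack, state =>
    match stack with
    | [] => count
    | b :: rest =>
      let (state', count', stack') := (rev.getD b []).foldl (bTouch b) (state, count, rest)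
      bLoop fuel rev count' stack' state'

def get_bricks_to_fall_count_alt (brick_id : Int) (bricks_below_map : List (Int × List Int)) : Int :=
  let (state, rev) := bBuild bricks_below_map
  bLoop (bricks_below_map.length + 1) rev 0 [brick_id] state

-- ===== PRECONDITION & SPEC =====
-- Pre_ excludes association lists with duplicate keys: a Python dict can never contain
-- them, so the assoc-list reading of such an input is ambiguous.
def Pre_get_bricks_to_fall_count (brick_id : Int) (bricks_below_map : List (Int × List Int)) : Prop :=
  (bricks_below_map.map Prod.fst).Nodup
instance (brick_id : Int) (bricks_below_map : List (Int × List Int)) : Decidable (Pre_get_bricks_to_fall_count brick_id bricks_below_map) := by unfold Pre_get_bricks_to_fall_count; infer_instance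

def pvWitness_get_bricks_to_fall_count : Int × (List (Int × List Int)) := (0, [(1, [0]), (2, [1])])

def Spec_get_bricks_to_fall_count (brick_id : Int) (bricks_below_map : List (Int × List Int)) (out : Int) : Prop := out = get_bricks_to_fall_count_alt brick_id bricks_below_map
instance (brick_id : Int) (bricks_below_map : List (Int × List Int)) (out : Int) : Decidable (Spec_get_bricks_to_fall_count brick_id bricks_below_map out) := by unfold Spec_get_bricks_to_fall_count; infer_instance

-- ===== CLAIM (what is proved, stated in full; the proofs are below) =====
def Claim_equal_get_bricks_to_fall_count : Prop := ∀ (brick_id : Int) (bricks_below_map : List (Int × List Int)), Dom_get_bricks_to_fall_count brick_id bricks_below_map → Pre_get_bricks_to_fall_count brick_id bricks_below_map → Spec_get_bricks_to_fall_count brick_id bricks_below_map (get_bricks_to_fall_count brick_id bricks_below_map)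

-- ===== LEMMAS AND PROOFS =====

-- state agrees with A's current map: for every entry, B's dict holds its length and
-- a counter extensionally equal to its multiset of supports.
def InvOn (m : List (Int × List Int)) (st : PySem.Dict Int (PySem.Dict Int Int × Int)) : Prop :=
  ∀ k bl, (k, bl) ∈ m → ∃ cnts, st.get? k = some (cnts, (bl.length : Int)) ∧
    ∀ x, cnts.getD x 0 = (bl.count x : Int)

lemma aScan_keys (b : Int) (m : List (Int × List Int)) :
    ((aScan b m).1).map Prod.fst = m.map Prod.fst := by
  induction m with
  | nil => rfl
  | cons kv rest ih =>
    obtain ⟨k, bl⟩ := kv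
    simp only [aScan]
    split_ifs <;> simp_all

lemma aScan_count_le (b : Int) (m : List (Int × List Int)) :
    ∀ k bl', (k, bl') ∈ (aScan b m).1 → ∃ bl, (k, bl) ∈ m ∧ ∀ x, bl'.count x ≤ bl.count x := by
  induction m with
  | nil => intro k bl' h; simp [aScan] at h
  | cons kv rest ih =>
    obtain ⟨k0, bl0⟩ := kv
    intro k bl' h
    simp only [aScan] at h
    by_cases hb : b ∈ bl0
    · simp only [if_pos hb, PySem.List.remove?_eq_some_erase _ _ hb, Option.getD_some] at h
      split_ifs at h <;>
      · rcases List.mem_cons.mp h with heq | htail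
        · obtain ⟨rfl, rfl⟩ := Prod.mk.injEq .. |>.mp heq
          refine ⟨bl0, List.mem_cons_self .., ?_⟩
          intro x; rw [List.count_erase]; omega
        · obtain ⟨bl, hbl, hle⟩ := ih k bl' htail
          exact ⟨bl, List.mem_cons_of_mem _ hbl, hle⟩
    · rw [if_neg hb] at h
      rcases List.mem_cons.mp h with heq | htail
      · obtain ⟨rfl, rfl⟩ := Prod.mk.injEq .. |>.mp heq
        exact ⟨bl', List.mem_cons_self .., fun x => le_refl _⟩
      · obtain ⟨bl, hbl, hle⟩ := ih k bl' htail
        exact ⟨bl, List.mem_cons_of_mem _ hbl, hle⟩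

lemma scan_fold (b : Int) (m : List (Int × List Int)) :
    ∀ (L : List Int) (st : PySem.Dict Int (PySem.Dict Int Int × Int)) (count : Int)
      (stack : List Int),
    (m.map Prod.fst).Nodup →
    L.Sublist (m.map Prod.fst) →
    (∀ k bl, (k, bl) ∈ m → b ∈ bl → k ∈ L) →
    InvOn m st →
    ∃ st', L.foldl (bTouch b) (st, count, stack) =
        (st', count + (((aScan b m).2.length : Nat) : Int), (aScan b m).2.reverse ++ stack)
      ∧ InvOn (aScan b m).1 st'
      ∧ (∀ k', k' ∉ m.map Prod.fst → st'.get? k' = st.get? k') := by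
  induction m with
  | nil =>
    intro L st count stack _ hsub _ _
    have hL : L = [] := List.sublist_nil.mp hsub
    subst hL
    exact ⟨st, by simp [aScan], by intro k bl h; simp [aScan] at h, fun k' _ => rfl⟩
  | cons kv mr ih =>
    obtain ⟨k0, bl0⟩ := kv
    intro L st count stack hnd hsub hcmp hinv
    rw [List.map_cons] at hsub hnd
    rw [List.nodup_cons] at hnd
    obtain ⟨cnts, hget, hc⟩ := hinv k0 bl0 (List.mem_cons_self ..)
    have hgetD : st.getD k0 (PySem.Dict.empty, 0) = (cnts, ((bl0.length : Nat) : Int)) :=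
      PySem.Dict.getD_of_get?_eq_some st (PySem.Dict.empty, 0) hget
    have hinvmr : InvOn mr st := fun k bl h => hinv k bl (List.mem_cons_of_mem _ h)
    by_cases hkL : k0 ∈ L
    · obtain ⟨L', rfl, hsub'⟩ : ∃ L', L = k0 :: L' ∧ L'.Sublist (mr.map Prod.fst) := by
        rcases List.sublist_cons_iff.mp hsub with h1 | ⟨r, rfl, hr⟩
        · exact absurd (h1.mem hkL) hnd.1
        · exact ⟨r, rfl, hr⟩
      have hcmp' : ∀ k bl, (k, bl) ∈ mr → b ∈ bl → k ∈ L' := by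
        intro k bl hm hbb
        have hk : k ∈ mr.map Prod.fst := List.mem_map.mpr ⟨(k, bl), hm, rfl⟩
        have := hcmp k bl (List.mem_cons_of_mem _ hm) hbb
        rcases List.mem_cons.mp this with rfl | h2
        · exact absurd hk hnd.1
        · exact h2
      by_cases hb : b ∈ bl0
      · -- head entry is decremented
        have hcpos : (0 : Int) < cnts.getD b 0 := by
          rw [hc b]; exact_mod_cast List.count_pos_iff.mpr hb
        have hlen1 : 1 ≤ bl0.length := List.length_pos_of_mem hb
        have hlene : (bl0.erase b).length = bl0.length - 1 := List.length_erase_of_mem hb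
        set st1 := st.insert k0 (cnts.insert b (cnts.getD b 0 - 1), ((bl0.length : Nat) : Int) - 1) with hst1
        have hinv1 : InvOn mr st1 := by
          intro k bl h
          have hkne : k ≠ k0 := by
            intro hkk; subst hkk
            exact hnd.1 (List.mem_map.mpr ⟨(k, bl), h, rfl⟩)
          obtain ⟨c2, hg2, hc2⟩ := hinvmr k bl h
          exact ⟨c2, by rw [hst1, PySem.Dict.get?_insert_of_ne _ _ hkne, hg2], hc2⟩
        have hstep : bTouch b (st, count, stack) k0 =
            (st1,
             if ((bl0.length : Nat) : Int) - 1 = 0 then count + 1 else count,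
             if ((bl0.length : Nat) : Int) - 1 = 0 then k0 :: stack else stack) := by
          simp only [bTouch, hgetD]
          rw [if_pos hcpos]
          split_ifs <;> rfl
        by_cases hz : ((bl0.length : Nat) : Int) - 1 = 0
        · -- belows becomes empty: count + 1, push k0
          have hee : bl0.erase b = [] := by
            rw [← List.length_eq_zero_iff, hlene]; omega
          obtain ⟨st', heqf, hinvf, hfrf⟩ :=
            ih L' st1 (count + 1) (k0 :: stack) hnd.2 hsub' hcmp' hinv1
          refine ⟨st', ?_, ?_, ?_⟩
          · rw [List.foldl_cons, hstep, if_pos hz, if_pos hz, heqf]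
            simp only [aScan, if_pos hb, PySem.List.remove?_eq_some_erase _ _ hb,
              Option.getD_some, if_pos hee]
            simp only [List.length_cons, List.reverse_cons, List.append_assoc,
              List.cons_append, List.nil_append]
            refine congrArg₂ _ rfl (congrArg₂ _ ?_ rfl)
            push_cast; ring
          · simp only [aScan, if_pos hb, PySem.List.remove?_eq_some_erase _ _ hb,
              Option.getD_some, if_pos hee]
            intro k bl h
            rcases List.mem_cons.mp h with heq | htail
            · obtain ⟨rfl, rfl⟩ := Prod.mk.injEq .. |>.mp heq
              refine ⟨cnts.insert b (cnts.getD b 0 - 1), ?_, ?_⟩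
              · rw [hfrf _ hnd.1, hst1, PySem.Dict.get?_insert_self, hee]
                simp
                omega
              · intro x
                rw [hee]
                by_cases hxb : x = b
                · subst hxb
                  rw [PySem.Dict.getD_insert_self, hc x]
                  simp
                  have h1 : bl0.count x = 1 := by
                    have hle := List.count_le_length (a := x) (l := bl0)
                    have hpos := List.count_pos_iff.mpr hb
                    omega
                  omega
                · rw [PySem.Dict.getD_insert_of_ne _ _ _ hxb, hc x]
                  simp
                  obtain ⟨a, ha⟩ := List.length_eq_one_iff.mp (by omega : bl0.length = 1)
                  subst ha
                  simp only [List.mem_singleton] at hb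
                  subst hb
                  simp [List.count_cons]
                  exact fun h => hxb h.symm
            · exact hinvf k bl htail
          · intro k' hk'
            rw [List.map_cons, List.mem_cons] at hk'
            push Not at hk'
            rw [hfrf k' hk'.2, hst1, PySem.Dict.get?_insert_of_ne _ _ hk'.1]
        · -- belows stays nonempty
          have hee : ¬ bl0.erase b = [] := by
            intro h
            have := congrArg List.length h
            rw [hlene] at this
            simp at this
            omega
          obtain ⟨st', heqf, hinvf, hfrf⟩ :=
            ih L' st1 count stack hnd.2 hsub' hcmp' hinv1
          refine ⟨st', ?_, ?_, ?_⟩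
          · rw [List.foldl_cons, hstep, if_neg hz, if_neg hz, heqf]
            simp only [aScan, if_pos hb, PySem.List.remove?_eq_some_erase _ _ hb,
              Option.getD_some, if_neg hee]
          · simp only [aScan, if_pos hb, PySem.List.remove?_eq_some_erase _ _ hb,
              Option.getD_some, if_neg hee]
            intro k bl h
            rcases List.mem_cons.mp h with heq | htail
            · obtain ⟨rfl, rfl⟩ := Prod.mk.injEq .. |>.mp heq
              refine ⟨cnts.insert b (cnts.getD b 0 - 1), ?_, ?_⟩
              · rw [hfrf _ hnd.1, hst1, PySem.Dict.get?_insert_self]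
                have hcast : (((bl0.erase b).length : Nat) : Int) = ((bl0.length : Nat) : Int) - 1 := by
                  rw [hlene]; omega
                rw [hcast]
              · intro x
                by_cases hxb : x = b
                · subst hxb
                  rw [PySem.Dict.getD_insert_self, hc x, List.count_erase_self]
                  have hpos := List.count_pos_iff.mpr hb
                  push_cast [hpos]
                  omega
                · rw [PySem.Dict.getD_insert_of_ne _ _ _ hxb, hc x,
                    List.count_erase_of_ne hxb]
            · exact hinvf k bl htail
          · intro k' hk'
            rw [List.map_cons, List.mem_cons] at hk'
            push Not at hk'
            rw [hfrf k' hk'.2, hst1, PySem.Dict.get?_insert_of_ne _ _ hk'.1]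
      · -- k0 ∈ L but b not in its belows: the touch is a no-op
        have hc0 : ¬ (0 : Int) < cnts.getD b 0 := by
          rw [hc b]
          simp [List.count_eq_zero_of_not_mem hb]
        have hstep : bTouch b (st, count, stack) k0 = (st, count, stack) := by
          simp only [bTouch, hgetD]
          rw [if_neg hc0]
        obtain ⟨st', heqf, hinvf, hfrf⟩ :=
          ih L' st count stack hnd.2 hsub' hcmp' hinvmr
        refine ⟨st', ?_, ?_, ?_⟩
        · rw [List.foldl_cons, hstep, heqf]
          simp only [aScan, if_neg hb]
        · simp only [aScan, if_neg hb]
          intro k bl h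
          rcases List.mem_cons.mp h with heq | htail
          · obtain ⟨rfl, rfl⟩ := Prod.mk.injEq .. |>.mp heq
            exact ⟨cnts, by rw [hfrf _ hnd.1, hget], hc⟩
          · exact hinvf k bl htail
        · intro k' hk'
          rw [List.map_cons, List.mem_cons] at hk'
          push Not at hk'
          exact hfrf k' hk'.2
    · -- k0 not touched at all: b cannot be in its belows
      have hb : b ∉ bl0 := fun hbb => hkL (hcmp k0 bl0 (List.mem_cons_self ..) hbb)
      have hsub' : L.Sublist (mr.map Prod.fst) := by
        rcases List.sublist_cons_iff.mp hsub with h1 | ⟨r, rfl, hr⟩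
        · exact h1
        · simp at hkL
      have hcmp' : ∀ k bl, (k, bl) ∈ mr → b ∈ bl → k ∈ L := fun k bl hm hbb =>
        hcmp k bl (List.mem_cons_of_mem _ hm) hbb
      obtain ⟨st', heqf, hinvf, hfrf⟩ := ih L st count stack hnd.2 hsub' hcmp' hinvmr
      refine ⟨st', ?_, ?_, ?_⟩
      · rw [heqf]
        simp only [aScan, if_neg hb]
      · simp only [aScan, if_neg hb]
        intro k bl h
        rcases List.mem_cons.mp h with heq | htail
        · obtain ⟨rfl, rfl⟩ := Prod.mk.injEq .. |>.mp heq
          exact ⟨cnts, by rw [hfrf _ hnd.1, hget], hc⟩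
        · exact hinvf k bl htail
      · intro k' hk'
        rw [List.map_cons, List.mem_cons] at hk'
        push Not at hk'
        exact hfrf k' hk'.2

lemma loop_eq : ∀ (fuel : Nat) (m : List (Int × List Int)) (count : Int) (stack : List Int)
    (st : PySem.Dict Int (PySem.Dict Int Int × Int)) (rev : PySem.Dict Int (List Int)),
    (m.map Prod.fst).Nodup →
    (∀ x, (rev.getD x []).Sublist (m.map Prod.fst)) →
    (∀ x k bl, (k, bl) ∈ m → 0 < bl.count x → k ∈ rev.getD x []) →
    InvOn m st →
    bLoop fuel rev count stack st = aLoop fuel count stack m := by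
  intro fuel
  induction fuel with
  | zero => intro m count stack st rev _ _ _ _; rfl
  | succ fuel ih =>
    intro m count stack st rev hnd hsub hcmp hinv
    match stack with
    | [] => rfl
    | b :: rest =>
      obtain ⟨st', heqf, hinvf, -⟩ :=
        scan_fold b m (rev.getD b []) st count rest hnd (hsub b)
          (fun k bl hm hbb => hcmp b k bl hm (List.count_pos_iff.mpr hbb)) hinv
      show bLoop (fuel + 1) rev count (b :: rest) st = aLoop (fuel + 1) count (b :: rest) m
      simp only [bLoop, aLoop]
      rw [heqf]
      exact ih (aScan b m).1 (count + (((aScan b m).2.length : Nat) : Int))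
        ((aScan b m).2.reverse ++ rest) st' rev
        (by rw [aScan_keys]; exact hnd)
        (by intro x; rw [aScan_keys]; exact hsub x)
        (by
          intro x k bl hm hcnt
          obtain ⟨bl0, hbl0, hle⟩ := aScan_count_le b m k bl hm
          exact hcmp x k bl0 hbl0 (lt_of_lt_of_le hcnt (hle x)))
        hinvf

-- counter built from a processed prefix: present iff the prefix contains the brick.
def CntsOk (pre : List Int) (cnts : PySem.Dict Int Int) : Prop :=
  ∀ x, cnts.get? x = if pre.count x = 0 then none else some ((pre.count x : Nat) : Int)

lemma bAdd_fold (above : Int) :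
    ∀ (bl pre : List Int) (cnts : PySem.Dict Int Int) (rev : PySem.Dict Int (List Int)),
    CntsOk pre cnts →
    ∃ cnts' rev', bl.foldl (bAddBelow above) (cnts, rev) = (cnts', rev')
      ∧ CntsOk (pre ++ bl) cnts'
      ∧ ∀ y, rev'.getD y [] = rev.getD y [] ++ (if y ∈ bl ∧ pre.count y = 0 then [above] else []) := by
  intro bl
  induction bl with
  | nil =>
    intro pre cnts rev hok
    exact ⟨cnts, rev, rfl, by simpa using hok, fun y => by simp⟩
  | cons x bl ih =>
    intro pre cnts rev hok
    have hget := hok x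
    by_cases hx : pre.count x = 0
    · have hcont : cnts.contains x = false := by
        rw [PySem.Dict.contains_eq_isSome_get?, hget, if_pos hx]; rfl
      have hok' : CntsOk (pre ++ [x]) (cnts.insert x 1) := by
        intro y
        by_cases hyx : y = x
        · subst hyx
          rw [PySem.Dict.get?_insert_self]
          simp [List.count_append, hx]
        · rw [PySem.Dict.get?_insert_of_ne _ _ hyx, hok y]
          have hxy : ¬x = y := fun h => hyx h.symm
          simp [List.count_append, hxy]
      obtain ⟨cnts', rev', heq, hok2, hrev2⟩ :=
        ih (pre ++ [x]) (cnts.insert x 1) (rev.insert x (rev.getD x [] ++ [above])) hok'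
      refine ⟨cnts', rev', ?_, by simpa using hok2, ?_⟩
      · rw [List.foldl_cons]
        have step : bAddBelow above (cnts, rev) x
            = (cnts.insert x 1, rev.insert x (rev.getD x [] ++ [above])) := by
          simp [bAddBelow, hcont]
        rw [step, heq]
      · intro y
        rw [hrev2 y, PySem.Dict.getD_insert]
        by_cases hyx : y = x
        · subst hyx
          simp [List.count_append, hx]
        · simp only [if_neg hyx]
          have : (y ∈ bl ∧ (pre ++ [x]).count y = 0) ↔ (y ∈ x :: bl ∧ pre.count y = 0) := by
            simp [List.count_append, List.mem_cons, hyx, Ne.symm hyx]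
          rw [if_congr this rfl rfl]
    · have hcont : cnts.contains x = true := by
        rw [PySem.Dict.contains_eq_isSome_get?, hget, if_neg hx]; rfl
      have hgd : cnts.getD x 0 = ((pre.count x : Nat) : Int) := by
        rw [PySem.Dict.getD_eq_get?_getD, hget, if_neg hx]; rfl
      have hok' : CntsOk (pre ++ [x]) (cnts.insert x (cnts.getD x 0 + 1)) := by
        intro y
        by_cases hyx : y = x
        · subst hyx
          rw [PySem.Dict.get?_insert_self, hgd]
          have hc : (pre ++ [y]).count y = pre.count y + 1 := by
            simp [List.count_append]
          rw [hc, if_neg (by omega)]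
          norm_cast
        · rw [PySem.Dict.get?_insert_of_ne _ _ hyx, hok y]
          have hxy : ¬x = y := fun h => hyx h.symm
          simp [List.count_append, hxy]
      obtain ⟨cnts', rev', heq, hok2, hrev2⟩ :=
        ih (pre ++ [x]) (cnts.insert x (cnts.getD x 0 + 1)) rev hok'
      refine ⟨cnts', rev', ?_, by simpa using hok2, ?_⟩
      · rw [List.foldl_cons]
        have step : bAddBelow above (cnts, rev) x
            = (cnts.insert x (cnts.getD x 0 + 1), rev) := by
          simp [bAddBelow, hcont]
        rw [step, heq]
      · intro y
        rw [hrev2 y]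
        by_cases hyx : y = x
        · subst hyx
          simp [List.count_append, hx]
        · have : (y ∈ bl ∧ (pre ++ [x]).count y = 0) ↔ (y ∈ x :: bl ∧ pre.count y = 0) := by
            simp [List.count_append, List.mem_cons, hyx, Ne.symm hyx]
          rw [if_congr this rfl rfl]

lemma bBuild_fold :
    ∀ (m : List (Int × List Int)) (st : PySem.Dict Int (PySem.Dict Int Int × Int))
      (rev : PySem.Dict Int (List Int)),
    (m.map Prod.fst).Nodup →
    ∃ st' rev', m.foldl bBuildStep (st, rev) = (st', rev')
      ∧ InvOn m st'
      ∧ (∀ y, rev'.getD y [] = rev.getD y [] ++ (m.filter (fun kv => kv.2.contains y)).map Prod.fst)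
      ∧ (∀ k, k ∉ m.map Prod.fst → st'.get? k = st.get? k) := by
  intro m
  induction m with
  | nil =>
    intro st rev _
    exact ⟨st, rev, rfl, by intro k bl h; simp at h, fun y => by simp, fun k _ => rfl⟩
  | cons kv rest ih =>
    obtain ⟨k0, bl0⟩ := kv
    intro st rev hnd
    have hnd' := hnd
    rw [List.map_cons, List.nodup_cons] at hnd'
    have hok0 : CntsOk ([] : List Int) PySem.Dict.empty := by
      intro x; simp [PySem.Dict.get?_empty]
    obtain ⟨cnts, rev1, heq1, hok1, hrev1⟩ := bAdd_fold k0 bl0 [] PySem.Dict.empty rev hok0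
    obtain ⟨st', rev', heq2, hinv2, hrev2, hfr2⟩ :=
      ih (st.insert k0 (cnts, PySem.List.len bl0)) rev1 hnd'.2
    have hcnts : ∀ x, cnts.getD x 0 = ((bl0.count x : Nat) : Int) := by
      intro x
      have := hok1 x
      rw [List.nil_append] at this
      rw [PySem.Dict.getD_eq_get?_getD, this]
      by_cases h0 : bl0.count x = 0 <;> simp [h0]
    refine ⟨st', rev', ?_, ?_, ?_, ?_⟩
    · rw [List.foldl_cons]
      show List.foldl bBuildStep (bBuildStep (st, rev) (k0, bl0)) rest = (st', rev')
      have hstep : bBuildStep (st, rev) (k0, bl0)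
          = (st.insert k0 (cnts, PySem.List.len bl0), rev1) := by
        simp only [bBuildStep, heq1]
      rw [hstep, heq2]
    · intro k bl hmem
      rcases List.mem_cons.mp hmem with heq | htail
      · obtain ⟨rfl, rfl⟩ := Prod.mk.injEq .. |>.mp heq
        refine ⟨cnts, ?_, hcnts⟩
        rw [hfr2 k hnd'.1, PySem.Dict.get?_insert_self]
        simp [PySem.List.len]
      · exact hinv2 k bl htail
    · intro y
      rw [hrev2 y, hrev1 y]
      by_cases hy : y ∈ bl0 <;>
        simp [List.filter_cons, hy, List.append_assoc]
    · intro k hk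
      rw [List.map_cons, List.mem_cons] at hk
      push Not at hk
      rw [hfr2 k hk.2, PySem.Dict.get?_insert_of_ne _ _ hk.1]

-- ===== VERDICT (by name: the statement is the Claim_ definition above) =====
theorem get_bricks_to_fall_count_spec : Claim_equal_get_bricks_to_fall_count := by
  intro brick_id m _hdom hpre
  unfold Spec_get_bricks_to_fall_count
  obtain ⟨st, rev, hbuild, hinv, hrev, -⟩ := bBuild_fold m PySem.Dict.empty PySem.Dict.empty hpre
  have hrev' : ∀ y, rev.getD y [] = (m.filter (fun kv => kv.2.contains y)).map Prod.fst := by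
    intro y; rw [hrev y]; simp [PySem.Dict.getD_empty]
  unfold get_bricks_to_fall_count get_bricks_to_fall_count_alt
  rw [bBuild, hbuild]
  refine Eq.symm (loop_eq (m.length + 1) m 0 [brick_id] st rev hpre ?_ ?_ hinv)
  · intro x; rw [hrev' x]
    exact List.Sublist.map Prod.fst List.filter_sublist
  · intro x k bl hmem hcnt
    rw [hrev' x]
    have : (k, bl) ∈ m.filter (fun kv => kv.2.contains x) := by
      rw [List.mem_filter]
      exact ⟨hmem, by simpa using List.count_pos_iff.mp hcnt⟩
    exact List.mem_map.mpr ⟨(k, bl), this, rfl⟩
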